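-- pv_equiv track=rewrite | github.com/Nithin1729S/iste.nitk.ac.in | backend-code/cryptonite/questions.py | question3
-- ===== SOURCE A (Python) =====
-- def printDivisors(n):
--     divisors = []
--     i = 1
--     while i <= n:
--         if (n % i == 0):
--             divisors.append(i)
--
--         i = i + 1
--     return divisors
--
-- def compute_hcf(x, y):
--     # choose the smaller number
--     if x > y:
--         smaller = y
--     else:
--         smaller = x
--     for i in range(1, smaller+1):
--         if((x % i == 0) and (y % i == 0)):
--             hcf = i
--     return hcf
--
-- def question3(n):
--     coprimes = []
--     div = printDivisors(n)
--     for i in range(2, 10000):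
--         HCF = 1
--         for divisor in div:
--             HCF = max(compute_hcf(divisor, i), HCF)
--         if(HCF == 1 and (i not in coprimes)):
--             coprimes.append(i)
--             if(len(coprimes) == 4):
--                 return coprimes
--
--     return coprimes
-- ===== SOURCE B (Python) =====
-- def question3(n):
--     # distinct prime factors of n by trial division (empty for n < 2)
--     factors = []
--     m = n
--     d = 2
--     while d * d <= m:
--         if m % d == 0:
--             factors.append(d)
--             while m % d == 0:
--                 m //= d
--         d += 1
--     if m > 1:
--         factors.append(m)
--     coprimes = []
--     i = 2
--     while i < 10000 and len(coprimes) < 4: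
--         if all(i % p != 0 for p in factors):
--             coprimes.append(i)
--         i += 1
--     return coprimes
-- ===== Notes on version B (the rewrite author's own statement) =====
-- stated objective: faster
-- what changed: A enumerates all divisors of n (O(n) loop) and computes each HCF with a linear trial loop over every candidate; B factors n once by trial division up to sqrt(n) and tests each candidate for divisibility by the few distinct prime factors only.
import Mathlib
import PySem

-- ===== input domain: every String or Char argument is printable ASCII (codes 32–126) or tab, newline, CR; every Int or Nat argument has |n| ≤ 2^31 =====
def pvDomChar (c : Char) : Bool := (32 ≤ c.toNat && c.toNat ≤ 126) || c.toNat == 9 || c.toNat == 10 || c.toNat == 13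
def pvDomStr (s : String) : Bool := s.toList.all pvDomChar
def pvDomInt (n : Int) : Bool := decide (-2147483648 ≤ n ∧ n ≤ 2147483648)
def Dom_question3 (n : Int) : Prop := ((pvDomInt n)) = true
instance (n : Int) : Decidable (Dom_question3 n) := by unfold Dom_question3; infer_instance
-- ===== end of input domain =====

-- B replaces A's divisor enumeration plus per-candidate HCF loops by one trial-division
-- prime factorisation of n followed by divisibility tests against the prime factors (faster).

-- ===== PORT A =====
-- while i <= n: if n % i == 0: divisors.append(i); i += 1
def divLoop (n i : Int) (acc : List Int) : List Int :=
  if _h : i ≤ n then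
    divLoop n (i + 1) (if PySem.Int.mod n i = 0 then acc ++ [i] else acc)
  else acc
termination_by (n + 1 - i).toNat
decreasing_by
  exact (Int.toNat_lt_toNat (Int.sub_pos.mpr (Int.lt_add_one_iff.mpr _h))).mpr
    (sub_lt_sub_left (lt_add_one i) (n + 1))

def printDivisors (n : Int) : List Int := divLoop n 1 []

-- Python leaves `hcf` unassigned when the loop body never fires (smaller ≤ 0); the 0 initial
-- value here is never returned in question3's calls, where both arguments are ≥ 1.
def computeHcf (x y : Int) : Int :=
  let smaller := if x > y then y else x
  (PySem.List.pyRange 1 (smaller + 1) 1).foldl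
    (fun hcf i => if PySem.Int.mod x i = 0 ∧ PySem.Int.mod y i = 0 then i else hcf) 0

def q3Loop (div : List Int) (xs : List Int) (coprimes : List Int) : List Int :=
  match xs with
  | [] => coprimes
  | i :: rest =>
    let HCF := div.foldl (fun h d => max (computeHcf d i) h) 1
    if HCF = 1 ∧ i ∉ coprimes then
      if (coprimes ++ [i]).length = 4 then coprimes ++ [i]
      else q3Loop div rest (coprimes ++ [i])
    else q3Loop div rest coprimes

def question3 (n : Int) : List Int :=
  q3Loop (printDivisors n) (PySem.List.pyRange 2 10000 1) []

-- ===== PORT B =====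
-- inner `while m % d == 0: m //= d`; the extra guards 1 ≤ m, 2 ≤ d only make the same
-- computation total (they hold at every call factLoop makes).
def divOut (m d : Int) : Int :=
  if h : PySem.Int.mod m d = 0 ∧ 1 ≤ m ∧ 2 ≤ d then divOut (PySem.Int.floordiv m d) d else m
termination_by m.toNat
decreasing_by
  have hd0 : (0:Int) < d := lt_of_lt_of_le zero_lt_two h.2.2
  have hm0 : (0:Int) < m := lt_of_lt_of_le zero_lt_one h.2.1
  exact (Int.toNat_lt_toNat hm0).mpr
    ((PySem.Int.floordiv_lt_iff_lt_mul hd0).mpr (lt_mul_right hm0 (lt_of_lt_of_le one_lt_two h.2.2)))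

-- termination helper for factLoop (cited in its decreasing_by)
theorem divOut_le (m d : Int) : divOut m d ≤ m := by
  fun_induction divOut m d with
  | case1 m h ih =>
    have hd : (0:Int) < d := lt_of_lt_of_le zero_lt_two h.2.2
    have hfl : PySem.Int.floordiv m d ≤ m := by
      rw [PySem.Int.floordiv_eq_ediv_of_pos hd]
      exact Int.ediv_le_self d (le_trans zero_le_one h.2.1)
    exact le_trans ih hfl
  | case2 m h => exact le_refl m

def factLoop (m d : Int) (f : List Int) : List Int :=
  if h : d * d ≤ m then
    if PySem.Int.mod m d = 0 then factLoop (divOut m d) (d + 1) (f ++ [d])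
    else factLoop m (d + 1) f
  else if 1 < m then f ++ [m] else f
termination_by (m + 1 - d).toNat
decreasing_by
  · have hdm : d ≤ m := le_trans ((pow_two d) ▸ Int.le_self_sq d) h
    refine (Int.toNat_lt_toNat (Int.sub_pos.mpr (Int.lt_add_one_iff.mpr hdm))).mpr ?_
    rw [add_sub_add_right_eq_sub]
    exact sub_lt_sub_right (Int.lt_add_one_iff.mpr (divOut_le m d)) d
  · have hdm : d ≤ m := le_trans ((pow_two d) ▸ Int.le_self_sq d) h
    exact (Int.toNat_lt_toNat (Int.sub_pos.mpr (Int.lt_add_one_iff.mpr hdm))).mpr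
      (sub_lt_sub_left (lt_add_one d) (m + 1))

def bLoop (ps : List Int) (i : Int) (acc : List Int) : List Int :=
  if _h : i < 10000 ∧ acc.length < 4 then
    bLoop ps (i + 1)
      (if ps.all (fun p => decide (PySem.Int.mod i p ≠ 0)) then acc ++ [i] else acc)
  else acc
termination_by (10000 - i).toNat
decreasing_by
  exact (Int.toNat_lt_toNat (Int.sub_pos.mpr _h.1)).mpr (sub_lt_sub_left (lt_add_one i) 10000)

def question3_alt (n : Int) : List Int :=
  bLoop (factLoop n 2 []) 2 []

-- ===== PRECONDITION & SPEC =====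
def Spec_question3 (n : Int) (out : List Int) : Prop := out = question3_alt n
instance (n : Int) (out : List Int) : Decidable (Spec_question3 n out) := by unfold Spec_question3; infer_instance

-- ===== CLAIM (what is proved, stated in full; the proofs are below) =====
def Claim_equal_question3 : Prop := ∀ (n : Int), Dom_question3 n → Spec_question3 n (question3 n)

-- ===== LEMMAS AND PROOFS =====

theorem mem_divLoop (n : Int) : ∀ (i : Int) (acc : List Int) (d : Int),
    d ∈ divLoop n i acc ↔ d ∈ acc ∨ (i ≤ d ∧ d ≤ n ∧ d ∣ n) := by
  intro i acc d
  fun_induction divLoop n i acc with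
  | case1 i acc h ih =>
    simp only [dite_eq_ite] at ih
    rw [ih]
    by_cases hm : PySem.Int.mod n i = 0
    · have hdvd : i ∣ n := (PySem.Int.mod_eq_zero_iff_dvd n i).mp hm
      simp only [if_pos hm, List.mem_append, List.mem_singleton]
      constructor
      · rintro ((hd | rfl) | ⟨h1, h2, h3⟩)
        · exact Or.inl hd
        · exact Or.inr ⟨le_refl _, h, hdvd⟩
        · exact Or.inr ⟨by omega, h2, h3⟩
      · rintro (hd | ⟨h1, h2, h3⟩)
        · exact Or.inl (Or.inl hd)
        · rcases eq_or_lt_of_le h1 with heq | hlt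
          · exact Or.inl (Or.inr heq.symm)
          · exact Or.inr ⟨by omega, h2, h3⟩
    · simp only [if_neg hm]
      constructor
      · rintro (hd | ⟨h1, h2, h3⟩)
        · exact Or.inl hd
        · exact Or.inr ⟨by omega, h2, h3⟩
      · rintro (hd | ⟨h1, h2, h3⟩)
        · exact Or.inl hd
        · refine Or.inr ⟨?_, h2, h3⟩
          rcases eq_or_lt_of_le h1 with heq | hlt
          · subst heq
            exact absurd ((PySem.Int.mod_eq_zero_iff_dvd n i).mpr h3) hm
          · omega
  | case2 i acc h =>
    constructor
    · exact Or.inl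
    · rintro (hd | ⟨h1, h2, _⟩)
      · exact hd
      · omega

theorem foldl_noP (p : Int → Prop) [DecidablePred p] :
    ∀ (l : List Int) (a : Int), (∀ x ∈ l, ¬ p x) →
      l.foldl (fun h i => if p i then i else h) a = a := by
  intro l
  induction l with
  | nil => intro a _; rfl
  | cons x xs ih =>
    intro a hl
    simp only [List.foldl_cons]
    rw [if_neg (hl x (by simp))]
    exact ih a (fun y hy => hl y (by simp [hy]))

theorem foldl_lastP (p : Int → Prop) [DecidablePred p] :
    ∀ (l : List Int) (a g : Int), l.Pairwise (· < ·) → g ∈ l → p g →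
      (∀ x ∈ l, p x → x ≤ g) → l.foldl (fun h i => if p i then i else h) a = g := by
  intro l
  induction l with
  | nil => intro a g _ hg; simp at hg
  | cons x xs ih =>
    intro a g hp hg hpg hub
    rw [List.pairwise_cons] at hp
    simp only [List.foldl_cons]
    by_cases hx : x = g
    · subst hx
      rw [if_pos hpg]
      apply foldl_noP
      intro y hy hpy
      have h1 := hub y (by simp [hy]) hpy
      have h2 := hp.1 y hy
      omega
    · have hgx : g ∈ xs := by
        rcases List.mem_cons.mp hg with h | h
        · exact absurd h.symm hx
        · exact h
      exact ih _ g hp.2 hgx hpg (fun y hy hpy => hub y (by simp [hy]) hpy)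

theorem hcf_fold (x y s : Int) (hx : 1 ≤ x) (hy : 1 ≤ y) (hs : s = min x y) :
    (PySem.List.pyRange 1 (s + 1) 1).foldl
      (fun hcf i => if PySem.Int.mod x i = 0 ∧ PySem.Int.mod y i = 0 then i else hcf) 0
      = Int.gcd x y := by
  have hgpos : 0 < Int.gcd x y := Int.gcd_pos_iff.mpr (Or.inl (by omega))
  have hg1 : 1 ≤ (Int.gcd x y : Int) := by exact_mod_cast hgpos
  have hgx : (Int.gcd x y : Int) ∣ x := Int.gcd_dvd_left x y
  have hgy : (Int.gcd x y : Int) ∣ y := Int.gcd_dvd_right x y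
  have hglex : (Int.gcd x y : Int) ≤ x := Int.le_of_dvd (by omega) hgx
  have hgley : (Int.gcd x y : Int) ≤ y := Int.le_of_dvd (by omega) hgy
  apply foldl_lastP (p := fun i => PySem.Int.mod x i = 0 ∧ PySem.Int.mod y i = 0)
  · exact PySem.List.pairwise_lt_pyRange_one 1 (s + 1)
  · rw [PySem.List.mem_pyRange_one]
    omega
  · exact ⟨(PySem.Int.mod_eq_zero_iff_dvd x _).mpr hgx,
           (PySem.Int.mod_eq_zero_iff_dvd y _).mpr hgy⟩
  · intro i hi hpi
    rw [PySem.List.mem_pyRange_one] at hi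
    have hix : i ∣ x := (PySem.Int.mod_eq_zero_iff_dvd x i).mp hpi.1
    have hiy : i ∣ y := (PySem.Int.mod_eq_zero_iff_dvd y i).mp hpi.2
    have : i.natAbs ∣ Int.gcd x y := Int.dvd_gcd (Int.natAbs_dvd.mpr hix) (Int.natAbs_dvd.mpr hiy)
    have h2 : (i.natAbs : Int) ∣ (Int.gcd x y : Int) := Int.natCast_dvd_natCast.mpr this
    have h3 : (i.natAbs : Int) ≤ (Int.gcd x y : Int) := Int.le_of_dvd (by omega) h2
    omega

theorem computeHcf_eq_gcd (x y : Int) (hx : 1 ≤ x) (hy : 1 ≤ y) :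
    computeHcf x y = Int.gcd x y := by
  show (PySem.List.pyRange 1 ((if x > y then y else x) + 1) 1).foldl
      (fun hcf i => if PySem.Int.mod x i = 0 ∧ PySem.Int.mod y i = 0 then i else hcf) 0
      = Int.gcd x y
  exact hcf_fold x y _ hx hy (by split <;> omega)

theorem foldl_max_one_iff (g : Int → Int) :
    ∀ (l : List Int) (a : Int), 1 ≤ a → (∀ d ∈ l, 1 ≤ g d) →
      (l.foldl (fun h d => max (g d) h) a = 1 ↔ a = 1 ∧ ∀ d ∈ l, g d = 1) := by
  intro l
  induction l with
  | nil => intro a _ _; simp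
  | cons d l ih =>
    intro a ha hl
    simp only [List.foldl_cons]
    have h1 : 1 ≤ g d := hl d (by simp)
    rw [ih (max (g d) a) (by omega) (fun e he => hl e (by simp [he]))]
    constructor
    · rintro ⟨hm, hall⟩
      refine ⟨by omega, ?_⟩
      intro e he
      rcases List.mem_cons.mp he with heq | he'
      · subst heq; omega
      · exact hall e he'
    · rintro ⟨rfl, hall⟩
      have hgd : g d = 1 := hall d (by simp)
      exact ⟨by omega, fun e he => hall e (by simp [he])⟩

theorem mem_printDivisors (n d : Int) :
    d ∈ printDivisors n ↔ 1 ≤ d ∧ d ≤ n ∧ d ∣ n := by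
  rw [printDivisors, mem_divLoop]
  simp

theorem condA_iff_gcd (n i : Int) (hn : 1 ≤ n) (hi : 2 ≤ i) :
    ((printDivisors n).foldl (fun h d => max (computeHcf d i) h) 1 = 1) ↔ Int.gcd n i = 1 := by
  have hpos : ∀ d ∈ printDivisors n, 1 ≤ computeHcf d i := by
    intro d hd
    rw [mem_printDivisors] at hd
    rw [computeHcf_eq_gcd d i hd.1 (by omega)]
    have : 0 < Int.gcd d i := Int.gcd_pos_iff.mpr (Or.inr (by omega))
    exact_mod_cast this
  rw [foldl_max_one_iff (fun d => computeHcf d i) (printDivisors n) 1 le_rfl hpos]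
  constructor
  · rintro ⟨-, hall⟩
    have hmem : n ∈ printDivisors n := (mem_printDivisors n n).mpr ⟨hn, le_rfl, dvd_refl n⟩
    have := hall n hmem
    rw [computeHcf_eq_gcd n i hn (by omega)] at this
    exact_mod_cast this
  · intro hgcd
    refine ⟨rfl, ?_⟩
    intro d hd
    rw [mem_printDivisors] at hd
    rw [computeHcf_eq_gcd d i hd.1 (by omega)]
    have h1 : ((Int.gcd d i : Nat) : Int) ∣ n := dvd_trans (Int.gcd_dvd_left d i) hd.2.2
    have h2 : ((Int.gcd d i : Nat) : Int) ∣ i := Int.gcd_dvd_right d i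
    have h3 : Int.gcd d i ∣ Int.gcd n i := Int.dvd_gcd h1 h2
    rw [hgcd] at h3
    have := Nat.dvd_one.mp h3
    exact_mod_cast this

theorem int_prime_two_le (q : Int) (hq : Prime q) (hpos : 0 < q) : 2 ≤ q := by
  have h1 : Nat.Prime q.natAbs := Int.prime_iff_natAbs_prime.mp hq
  have := h1.two_le
  omega

theorem divOut_pos (m d : Int) : 1 ≤ m → 1 ≤ divOut m d := by
  fun_induction divOut m d with
  | case1 m h ih =>
    intro _
    apply ih
    rw [PySem.Int.le_floordiv_iff_mul_le (by omega)]
    have hdvd : d ∣ m := (PySem.Int.mod_eq_zero_iff_dvd m d).mp h.1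
    have := Int.le_of_dvd (by omega) hdvd
    omega
  | case2 m h => intro h1; exact h1

theorem divOut_dvd (m d : Int) : divOut m d ∣ m := by
  fun_induction divOut m d with
  | case1 m h ih =>
    obtain ⟨h0, h1, h2⟩ := h
    have hdvd : d ∣ m := (PySem.Int.mod_eq_zero_iff_dvd m d).mp h0
    have hfd : PySem.Int.floordiv m d ∣ m := by
      rw [PySem.Int.floordiv_eq_ediv_of_pos (by omega)]
      exact ⟨d, (Int.ediv_mul_cancel hdvd).symm⟩
    exact dvd_trans ih hfd
  | case2 m h => exact dvd_refl m

theorem divOut_not_dvd (m d : Int) : 1 ≤ m → 2 ≤ d → ¬ d ∣ divOut m d := by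
  fun_induction divOut m d with
  | case1 m h ih =>
    intro _ hd
    apply ih _ hd
    rw [PySem.Int.le_floordiv_iff_mul_le (by omega)]
    have hdvd : d ∣ m := (PySem.Int.mod_eq_zero_iff_dvd m d).mp h.1
    have := Int.le_of_dvd (by omega) hdvd
    omega
  | case2 m h =>
    intro h1 h2 hdvd
    exact h ⟨(PySem.Int.mod_eq_zero_iff_dvd m d).mpr hdvd, h1, by omega⟩

theorem divOut_prime_dvd (m d : Int) (q : Int) (hq : Prime q) :
    q ∣ m → q ∣ divOut m d ∨ q ∣ d := by
  fun_induction divOut m d with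
  | case1 m h ih =>
    intro hqm
    obtain ⟨h0, h1, h2⟩ := h
    have hdvd : d ∣ m := (PySem.Int.mod_eq_zero_iff_dvd m d).mp h0
    have hsplit : m = PySem.Int.floordiv m d * d := by
      rw [PySem.Int.floordiv_eq_ediv_of_pos (by omega)]
      exact (Int.ediv_mul_cancel hdvd).symm
    rw [hsplit] at hqm
    rcases (hq.dvd_mul).mp hqm with hl | hr
    · exact ih hl
    · exact Or.inr hr
  | case2 m h => intro hqm; exact Or.inl hqm

theorem factLoop_spec (n : Int) : ∀ (m d : Int) (f : List Int),
    2 ≤ d → 1 ≤ m → m ∣ n →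
    (∀ q : Int, Prime q → 0 < q → q ∣ m → d ≤ q) →
    (∀ p ∈ f, p ∣ n ∧ 2 ≤ p) →
    (∀ q : Int, Prime q → 0 < q → q ∣ n → q ∈ f ∨ q ∣ m) →
    (∀ p ∈ factLoop m d f, p ∣ n ∧ 2 ≤ p) ∧
    (∀ q : Int, Prime q → 0 < q → q ∣ n → q ∈ factLoop m d f) := by
  intro m d f
  fun_induction factLoop m d f with
  | case1 m d f hsq hmod ih =>
    intro hd hm1 hmn hsmall hf hcov
    have hdvd : d ∣ m := (PySem.Int.mod_eq_zero_iff_dvd m d).mp hmod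
    have hdn : d ∣ n := dvd_trans hdvd hmn
    have hout_dvd : divOut m d ∣ m := divOut_dvd m d
    have hout_pos : 1 ≤ divOut m d := divOut_pos m d hm1
    have hout_nd : ¬ d ∣ divOut m d := divOut_not_dvd m d hm1 hd
    apply ih (by omega) hout_pos (dvd_trans hout_dvd hmn)
    · intro q hq hqpos hqd
      have hqm : q ∣ m := dvd_trans hqd hout_dvd
      have h1 := hsmall q hq hqpos hqm
      have hne : q ≠ d := fun heq => hout_nd (heq ▸ hqd)
      omega
    · intro p hp
      rcases List.mem_append.mp hp with hp' | hp'
      · exact hf p hp'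
      · rw [List.mem_singleton] at hp'
        subst hp'
        exact ⟨hdn, hd⟩
    · intro q hq hqpos hqn
      rcases hcov q hq hqpos hqn with hqf | hqm
      · exact Or.inl (List.mem_append.mpr (Or.inl hqf))
      · rcases divOut_prime_dvd m d q hq hqm with hl | hr
        · exact Or.inr hl
        · have hle : q ≤ d := Int.le_of_dvd (by omega) hr
          have hge : d ≤ q := hsmall q hq hqpos hqm
          have : q = d := by omega
          subst this
          exact Or.inl (List.mem_append.mpr (Or.inr (by simp)))
  | case2 m d f hsq hmod ih =>
    intro hd hm1 hmn hsmall hf hcov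
    apply ih (by omega) hm1 hmn
    · intro q hq hqpos hqm
      have h1 := hsmall q hq hqpos hqm
      have hne : q ≠ d := by
        intro heq
        subst heq
        exact hmod ((PySem.Int.mod_eq_zero_iff_dvd m q).mpr hqm)
      omega
    · exact hf
    · exact hcov
  | case3 m d f hsq hm =>
    intro hd hm1 hmn hsmall hf hcov
    constructor
    · intro p hp
      rcases List.mem_append.mp hp with hp' | hp'
      · exact hf p hp'
      · rw [List.mem_singleton] at hp'
        subst hp'
        exact ⟨hmn, by omega⟩
    · intro q hq hqpos hqn
      rcases hcov q hq hqpos hqn with hqf | hqm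
      · exact List.mem_append.mpr (Or.inl hqf)
      · refine List.mem_append.mpr (Or.inr ?_)
        have hqle : q ≤ m := Int.le_of_dvd (by omega) hqm
        have hdq : d ≤ q := hsmall q hq hqpos hqm
        -- show q = m: otherwise the cofactor r = m / q exceeds 1 and has a prime factor ≥ d,
        -- forcing m ≥ d * d, contradicting ¬ d * d ≤ m
        have hsplit : q * (m / q) = m := Int.mul_ediv_cancel' hqm
        set r := m / q with hr
        have hq2 : 2 ≤ q := int_prime_two_le q hq hqpos
        have hrpos : 1 ≤ r := by nlinarith
        rcases eq_or_lt_of_le hrpos with heq | hlt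
        · rw [List.mem_singleton]
          rw [← heq] at hsplit
          omega
        · exfalso
          have hrne : r.natAbs ≠ 1 := by omega
          obtain ⟨p', hp'prime, hp'dvd⟩ := Int.exists_prime_and_dvd hrne
          have hQdvd : ((p'.natAbs : Nat) : Int) ∣ r := Int.natAbs_dvd.mpr hp'dvd
          have hQprime : Prime ((p'.natAbs : Nat) : Int) := by
            rw [Int.prime_iff_natAbs_prime, Int.natAbs_natCast]
            exact Int.prime_iff_natAbs_prime.mp hp'prime
          have hQ2 : (2 : Int) ≤ ((p'.natAbs : Nat) : Int) := by
            have := (Int.prime_iff_natAbs_prime.mp hp'prime).two_le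
            omega
          have hrm : r ∣ m := ⟨q, by rw [← hsplit]; ring⟩
          have hQm : ((p'.natAbs : Nat) : Int) ∣ m := dvd_trans hQdvd hrm
          have hQd : d ≤ ((p'.natAbs : Nat) : Int) := hsmall _ hQprime (by omega) hQm
          have hQler : ((p'.natAbs : Nat) : Int) ≤ r := Int.le_of_dvd (by omega) hQdvd
          have : d * d ≤ m := by nlinarith
          exact hsq this
  | case4 m d f hsq hm =>
    intro hd hm1 hmn hsmall hf hcov
    constructor
    · exact hf
    · intro q hq hqpos hqn
      rcases hcov q hq hqpos hqn with hqf | hqm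
      · exact hqf
      · exfalso
        have hmeq : m = 1 := by omega
        rw [hmeq] at hqm
        have := Int.le_of_dvd (by omega) hqm
        have := int_prime_two_le q hq hqpos
        omega

theorem condB_iff_gcd (n i : Int) (hn : 2 ≤ n) (hi : 2 ≤ i) :
    ((factLoop n 2 []).all (fun p => decide (PySem.Int.mod i p ≠ 0)) = true) ↔ Int.gcd n i = 1 := by
  obtain ⟨hP1, hP2⟩ := factLoop_spec n n 2 [] le_rfl (by omega) (dvd_refl n)
    (fun q hq hqpos _ => int_prime_two_le q hq hqpos)
    (by simp)
    (fun q _ _ hqn => Or.inr hqn)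
  rw [List.all_eq_true]
  constructor
  · intro hall
    by_contra hne
    have hg0 : Int.gcd n i ≠ 0 := by
      intro h0
      rw [Int.gcd_eq_zero_iff] at h0
      omega
    obtain ⟨p, hpprime, hpdvd⟩ := Nat.exists_prime_and_dvd hne
    have hpn : ((p : Nat) : Int) ∣ n := dvd_trans (Int.natCast_dvd_natCast.mpr hpdvd) (Int.gcd_dvd_left n i)
    have hpi : ((p : Nat) : Int) ∣ i := dvd_trans (Int.natCast_dvd_natCast.mpr hpdvd) (Int.gcd_dvd_right n i)
    have hpprime' : Prime ((p : Nat) : Int) := by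
      rw [Int.prime_iff_natAbs_prime, Int.natAbs_natCast]
      exact hpprime
    have hppos : 0 < ((p : Nat) : Int) := by
      have := hpprime.two_le
      omega
    have hmem := hP2 _ hpprime' hppos hpn
    have := hall _ hmem
    rw [decide_eq_true_iff] at this
    exact this ((PySem.Int.mod_eq_zero_iff_dvd i _).mpr hpi)
  · intro hgcd p hp
    rw [decide_eq_true_iff]
    intro hmod
    have hpi : p ∣ i := (PySem.Int.mod_eq_zero_iff_dvd i p).mp hmod
    obtain ⟨hpn, hp2⟩ := hP1 p hp
    have h3 : p.natAbs ∣ Int.gcd n i := Int.dvd_gcd (Int.natAbs_dvd.mpr hpn) (Int.natAbs_dvd.mpr hpi)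
    rw [hgcd] at h3
    have := Nat.dvd_one.mp h3
    omega

theorem printDivisors_nonpos (n : Int) (hn : n ≤ 0) : printDivisors n = [] := by
  rw [printDivisors, divLoop, dif_neg (by omega : ¬ (1:Int) ≤ n)]

theorem factLoop_small (n : Int) (hn : n ≤ 1) : factLoop n 2 [] = [] := by
  rw [factLoop, dif_neg (by omega : ¬ (2:Int) * 2 ≤ n), if_neg (by omega : ¬ (1:Int) < n)]

theorem cond_bridge (n : Int) : ∀ j, 2 ≤ j → j < 10000 →
    (((printDivisors n).foldl (fun h d => max (computeHcf d j) h) 1 = 1) ↔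
      ((factLoop n 2 []).all (fun p => decide (PySem.Int.mod j p ≠ 0)) = true)) := by
  intro j hj _
  by_cases hn : n ≤ 1
  · by_cases hn0 : n ≤ 0
    · rw [printDivisors_nonpos n hn0, factLoop_small n hn]
      simp
    · have hn1 : n = 1 := by omega
      subst hn1
      rw [factLoop_small 1 le_rfl, condA_iff_gcd 1 j le_rfl hj]
      simp [Int.gcd]
  · rw [condA_iff_gcd n j (by omega) hj, condB_iff_gcd n j (by omega) hj]

theorem loop_eq (div ps : List Int)
    (hco : ∀ j, 2 ≤ j → j < 10000 →
      ((div.foldl (fun h d => max (computeHcf d j) h) 1 = 1) ↔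
        (ps.all (fun p => decide (PySem.Int.mod j p ≠ 0)) = true))) :
    ∀ (i : Int) (acc : List Int), 2 ≤ i → (∀ x ∈ acc, x < i) → acc.length < 4 →
      q3Loop div (PySem.List.pyRange i 10000 1) acc = bLoop ps i acc := by
  intro i acc
  fun_induction bLoop ps i acc with
  | case1 i acc h ih =>
    intro hi hacc hlen
    rw [PySem.List.pyRange_one_cons (by omega : i < 10000)]
    simp only [q3Loop]
    have hnm : i ∉ acc := fun hmem => absurd (hacc i hmem) (lt_irrefl i)
    by_cases hA : div.foldl (fun h d => max (computeHcf d i) h) 1 = 1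
    · have hB : ps.all (fun p => decide (PySem.Int.mod i p ≠ 0)) = true :=
        (hco i hi h.1).mp hA
      rw [if_pos ⟨hA, hnm⟩]
      rw [dif_pos hB] at ih
      rw [if_pos hB]
      by_cases hl4 : (acc ++ [i]).length = 4
      · rw [if_pos hl4, bLoop, dif_neg (by simp at hl4 ⊢; omega)]
      · rw [if_neg hl4]
        apply ih (by omega) ?_ (by simp at hl4 ⊢; omega)
        intro x hx
        rcases List.mem_append.mp hx with hx' | hx'
        · have := hacc x hx'; omega
        · rw [List.mem_singleton] at hx'; omega
    · have hB : ¬ (ps.all (fun p => decide (PySem.Int.mod i p ≠ 0)) = true) :=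
        fun hb => hA ((hco i hi h.1).mpr hb)
      rw [if_neg (fun hc => hA hc.1)]
      rw [dif_neg hB] at ih
      rw [if_neg hB]
      apply ih (by omega) (fun x hx => by have := hacc x hx; omega) hlen
  | case2 i acc h =>
    intro hi hacc hlen
    have h10 : (10000:Int) ≤ i := by omega
    rw [PySem.List.pyRange_one_eq_nil h10]
    rfl

-- ===== VERDICT (by name: the statement is the Claim_ definition above) =====
theorem question3_spec : Claim_equal_question3 := by
  intro n _
  unfold Spec_question3 question3 question3_alt
  exact loop_eq (printDivisors n) (factLoop n 2 []) (cond_bridge n) 2 [] (by norm_num)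
    (by simp) (by simp)
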